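-- pv_equiv track=rewrite | github.com/GrandEchoWhiskey/my-bloodtype | bloodtype.py | shortenData
-- ===== SOURCE A (Python) =====
-- def getBlood(blood):
--     match(blood):
--         case 'AB':
--             return 'AB'
--         case 'AA' | 'A0':
--             return 'A'
--         case 'BB' | 'B0':
--             return 'B'
--     return '0'
--
-- def getRh(rh):
--     """
--     Rh- is recesive, so only two '-' alleles can
--     result in negative Rh. One '+' just becomes dominant.
--     """
--     if rh == '--':
--         return '-'
--     return '+'
--
-- def shortenData(data):
--     nData = dict()
--     for key in data:
--         newName = getBlood(key[:2:])+getRh(key[2::])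
--         if newName not in nData.keys():
--             nData[newName] = 0
--         nData[newName] = nData[newName] + data[key]
--     return nData
-- ===== SOURCE B (Python) =====
-- def getBlood(blood):
--     match(blood):
--         case 'AB':
--             return 'AB'
--         case 'AA' | 'A0':
--             return 'A'
--         case 'BB' | 'B0':
--             return 'B'
--     return '0'
--
-- def getRh(rh):
--     if rh == '--':
--         return '-'
--     return '+'
--
-- def shortenData(data):
--     # group-then-sum: derive every name first, list the distinct names in
--     # first-occurrence order, then do one summation pass per group
--     pairs = [(getBlood(k[:2]) + getRh(k[2:]), data[k]) for k in data]
--     seen = []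
--     for nm, _ in pairs:
--         if nm not in seen:
--             seen.append(nm)
--     return {nm: sum(v for n, v in pairs if n == nm) for nm in seen}
-- ===== Notes on version B (the rewrite author's own statement) =====
-- stated objective: alternative
-- what changed: Replaces A's single incremental dict-update scan with a two-phase group-then-sum shape: derive all names up front, collect the distinct names in first-occurrence order, then compute each group's total in its own summation pass.
import Mathlib
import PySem

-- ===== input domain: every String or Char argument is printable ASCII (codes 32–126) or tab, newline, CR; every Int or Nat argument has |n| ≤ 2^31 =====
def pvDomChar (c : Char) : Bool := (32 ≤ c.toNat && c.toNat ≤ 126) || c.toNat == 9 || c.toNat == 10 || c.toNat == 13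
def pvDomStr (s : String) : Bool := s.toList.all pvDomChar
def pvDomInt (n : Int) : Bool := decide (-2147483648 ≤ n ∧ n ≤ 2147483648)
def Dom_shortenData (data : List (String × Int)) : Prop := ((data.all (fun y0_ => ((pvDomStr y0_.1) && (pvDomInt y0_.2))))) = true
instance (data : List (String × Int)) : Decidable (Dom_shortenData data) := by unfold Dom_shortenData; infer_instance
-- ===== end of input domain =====

-- B replaces A's incremental dict-update scan with a group-then-sum pass (derive names, dedup in first-occurrence order, one summation per group); objective: alternative.


-- ===== PORT A =====
def getBlood (blood : String) : String :=
  if blood == "AB" then "AB"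
  else if blood == "AA" || blood == "A0" then "A"
  else if blood == "BB" || blood == "B0" then "B"
  else "0"

def getRh (rh : String) : String :=
  if rh == "--" then "-" else "+"

-- A: one incremental scan over the dict's keys, updating a running dict in place.
def shortenData (data : List (String × Int)) : List (String × Int) :=
  (data.foldl (fun nData p =>
      let newName := getBlood (PySem.Str.slice p.1 none (some 2)) ++ getRh (PySem.Str.slice p.1 (some 2) none)
      let nData := if nData.contains newName then nData else nData.insert newName 0
      nData.insert newName (nData.getD newName 0 + (PySem.Dict.mk data).getD p.1 0))
    PySem.Dict.empty).items

-- ===== PORT B =====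
-- B: derive all names, dedup to first-occurrence order, then one summation pass per group.
def shortenData_alt (data : List (String × Int)) : List (String × Int) :=
  let pairs := data.map (fun p =>
    (getBlood (PySem.Str.slice p.1 none (some 2)) ++ getRh (PySem.Str.slice p.1 (some 2) none),
     (PySem.Dict.mk data).getD p.1 0))
  let seen := pairs.foldl (fun s q => if q.1 ∈ s then s else s ++ [q.1]) []
  seen.map (fun nm => (nm, (pairs.filter (fun q => q.1 == nm)).foldl (fun a q => a + q.2) 0))

-- ===== PRECONDITION & SPEC =====
def Spec_shortenData (data : List (String × Int)) (out : List (String × Int)) : Prop := out = shortenData_alt data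
instance (data : List (String × Int)) (out : List (String × Int)) : Decidable (Spec_shortenData data out) := by unfold Spec_shortenData; infer_instance

-- ===== CLAIM (what is proved, stated in full; the proofs are below) =====
def Claim_equal_shortenData : Prop := ∀ (data : List (String × Int)), Dom_shortenData data → Spec_shortenData data (shortenData data)

-- ===== LEMMAS AND PROOFS =====

-- the distinct first components of ps, appended to s in first-occurrence order
def pvSeen (s : List String) (ps : List (String × Int)) : List String :=
  ps.foldl (fun s q => if q.1 ∈ s then s else s ++ [q.1]) s

def pvSum (ps : List (String × Int)) (nm : String) : Int :=
  (ps.filter (fun q => q.1 == nm)).foldl (fun a q => a + q.2) 0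

theorem pvSeen_mem (ps : List (String × Int)) (s : List String) (nm : String) :
    nm ∈ pvSeen s ps ↔ nm ∈ s ∨ nm ∈ ps.map Prod.fst := by
  induction ps generalizing s with
  | nil => simp [pvSeen]
  | cons q ps ih =>
      simp only [pvSeen, List.foldl_cons] at ih ⊢
      simp only [List.map_cons, List.mem_cons]
      by_cases h : q.1 ∈ s
      · rw [if_pos h, ih]
        constructor
        · rintro (h1 | h1)
          exacts [Or.inl h1, Or.inr (Or.inr h1)]
        · rintro (h1 | h1 | h1)
          exacts [Or.inl h1, Or.inl (h1 ▸ h), Or.inr h1]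
      · rw [if_neg h, ih]
        simp [or_assoc]

theorem pvSeen_nodup (ps : List (String × Int)) (s : List String) (hs : s.Nodup) :
    (pvSeen s ps).Nodup := by
  induction ps generalizing s with
  | nil => simpa [pvSeen]
  | cons q ps ih =>
      simp only [pvSeen, List.foldl_cons]
      by_cases h : q.1 ∈ s
      · simpa [h] using ih s hs
      · simp only [h, if_false]
        refine ih _ (List.nodup_append.mpr ⟨hs, List.nodup_singleton _, ?_⟩)
        intro a ha b hb
        simp only [List.mem_singleton] at hb
        subst hb
        exact fun he => h (he ▸ ha)

theorem pvSeen_append (ps : List (String × Int)) (q : String × Int) :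
    pvSeen [] (ps ++ [q]) = if q.1 ∈ pvSeen [] ps then pvSeen [] ps else pvSeen [] ps ++ [q.1] := by
  simp [pvSeen, List.foldl_append]

theorem pvSum_append (ps : List (String × Int)) (q : String × Int) (nm : String) :
    pvSum (ps ++ [q]) nm = if q.1 = nm then pvSum ps nm + q.2 else pvSum ps nm := by
  by_cases h : q.1 = nm <;> simp [pvSum, List.filter_append, h, List.foldl_append]

theorem pvSum_of_not_mem (ps : List (String × Int)) (nm : String) (h : nm ∉ ps.map Prod.fst) :
    pvSum ps nm = 0 := by
  have : ps.filter (fun q => q.1 == nm) = [] := by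
    apply List.filter_eq_nil_iff.mpr
    intro q hq hbeq
    exact h (List.mem_map.mpr ⟨q, hq, by simpa using hbeq⟩)
  simp [pvSum, this]

-- the core invariant: A's incremental dict equals B's group-then-sum table
theorem pvLoop_items (ps : List (String × Int)) :
    (ps.foldl (fun d (q : String × Int) =>
        let d := if d.contains q.1 then d else d.insert q.1 0
        d.insert q.1 (d.getD q.1 0 + q.2)) PySem.Dict.empty).items
      = (pvSeen [] ps).map (fun nm => (nm, pvSum ps nm)) := by
  induction ps using List.reverseRecOn with
  | nil => simp [pvSeen, pvSum, PySem.Dict.empty]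
  | append_singleton ps q ih =>
      rw [List.foldl_append]
      set d := ps.foldl (fun d (q : String × Int) =>
        let d := if d.contains q.1 then d else d.insert q.1 0
        d.insert q.1 (d.getD q.1 0 + q.2)) PySem.Dict.empty with hd
      have hkeys : d.keys = pvSeen [] ps := by
        simp only [PySem.Dict.keys, ih, List.map_map]
        rw [show ((fun x : String × ℤ => x.1) ∘ fun nm => (nm, pvSum ps nm)) = id from rfl,
            List.map_id]
      have hnd : d.keys.Nodup := by rw [hkeys]; exact pvSeen_nodup ps [] List.nodup_nil
      have hcont : d.contains q.1 = decide (q.1 ∈ pvSeen [] ps) := by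
        rw [PySem.Dict.contains_eq_decide_mem_keys, hkeys]
      by_cases hmem : q.1 ∈ pvSeen [] ps
      · -- existing group: in-place update
        have hget : d.getD q.1 0 = pvSum ps q.1 :=
          PySem.Dict.getD_of_mem_items d (by rw [ih]; exact List.mem_map.mpr ⟨q.1, hmem, rfl⟩) hnd 0
        simp only [List.foldl_cons, List.foldl_nil, hcont, hmem, decide_true, if_true]
        rw [PySem.Dict.items_insert_of_contains _ _ (by rw [hcont]; simpa),
            hget, ih, List.map_map, pvSeen_append, if_pos hmem]
        apply List.map_congr_left
        intro nm hnm
        by_cases h : q.1 = nm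
        · subst h; simp [pvSum_append]
        · simp [Function.comp, pvSum_append, h, Ne.symm h, beq_iff_eq]
      · -- new group: insert 0 then overwrite with 0 + value
        simp only [List.foldl_cons, List.foldl_nil, hcont, hmem, decide_false]
        rw [if_neg (by simp), PySem.Dict.getD_insert_self, PySem.Dict.insert_insert_self,
            PySem.Dict.items_insert_of_not_contains _ _ (by rw [hcont]; simpa),
            ih, pvSeen_append, if_neg hmem, List.map_append]
        have hq1 : q.1 ∉ ps.map Prod.fst := fun h => hmem ((pvSeen_mem ps [] q.1).mpr (Or.inr h))
        congr 1
        · apply List.map_congr_left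
          intro nm hnm
          have : q.1 ≠ nm := fun h => hmem (h ▸ hnm)
          simp [pvSum_append, this]
        · simp [pvSum_append, pvSum_of_not_mem ps q.1 hq1]

-- ===== VERDICT (by name: the statement is the Claim_ definition above) =====
theorem shortenData_spec : Claim_equal_shortenData := by
  intro data _
  show shortenData data = shortenData_alt data
  unfold shortenData shortenData_alt
  have h := pvLoop_items (data.map (fun p =>
    (getBlood (PySem.Str.slice p.1 none (some 2)) ++ getRh (PySem.Str.slice p.1 (some 2) none),
     (PySem.Dict.mk data).getD p.1 0)))
  rw [List.foldl_map] at h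
  simpa [pvSeen, pvSum] using h
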